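-- pv_equiv track=rewrite | github.com/Ruadaa/cadence_to_visio | cadence_to_visio_updata.py | match_device_type
-- ===== SOURCE A (Python) =====
-- DEVICE_LIBRARY = {
--     "NMOS": {
--         "inst_prefix": ["NM", "M"],
--         "netlist_prefix": ["XNM","XM"],
--         "master_name": "NMOS",
--         "size": (0.44, 0.59),
--         "pins": {
--             "D": ( 0.5,  0.5),
--             "G": (-0.5, 0.0),
--             "S": ( 0.5, -0.5),
--             "B": ( 0.0,  0.0),
--         }
--     },
--     "PMOS": {
--         "inst_prefix": ["PM"],
--         "netlist_prefix": ["XPM"],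
--         "master_name": "PMOS",
--         "size": (0.44, 0.59),
--         "pins": {
--             "D": ( 0.5, -0.5),
--             "G": (-0.5, 0.0),
--             "S": ( 0.5,  0.5),
--             "B": ( 0.0,  0.0),
--         }
--     },
--     "RES": {
--         "inst_prefix": ["R"],
--         "netlist_prefix": ["XR"],
--         "master_name": "R",
--         "size": (0.20, 0.59),
--         "pins": {
--             "R_up":   (0.0,  0.5),
--             "R_down": (0.0, -0.5),
--         }
--     },
--     "Cap": {
--         "inst_prefix": ["C"],
--         "netlist_prefix": ["CC"],
--         "master_name": "C",
--         "size": (0.20, 0.59),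
--         "pins": {
--             "C_up":   (0.0,  0.5),
--             "C_down": (0.0, -0.5),
--         }
--     },
--     # === 新增 Unknown 器件 ===
--     "UNKNOWN": {
--         "inst_prefix": [],
--         "netlist_prefix": [],
--         "master_name": "Unknown",
--         "size": (0.43, 0.43),
--         "pins": {
--             "P1": (0.0, 0.5),
--             "P2": (0.0, -0.5),
--             "P3": (0.5, 0),
--             "P4": (-0.5, 0),
--             "P5": (0.0, 0)
--         }
--     }
--     # 以后你可以自己加新器件
-- }
--
-- def match_device_type(name, from_netlist=False):
--     candidates = []
--     for dev_type, cfg in DEVICE_LIBRARY.items():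
--         prefixes = cfg["netlist_prefix"] if from_netlist else cfg["inst_prefix"]
--         for p in prefixes:
--             candidates.append((len(p), p, dev_type))
--     # 按前缀长度从大到小排序
--     for _, p, dev_type in sorted(candidates, key=lambda x: -x[0]):
--         if name.upper().startswith(p.upper()):
--             return dev_type
--     return "UNKNOWN"
-- ===== SOURCE B (Python) =====
-- DEVICE_LIBRARY = {
--     "NMOS": {"inst_prefix": ["NM", "M"], "netlist_prefix": ["XNM", "XM"]},
--     "PMOS": {"inst_prefix": ["PM"], "netlist_prefix": ["XPM"]},
--     "RES": {"inst_prefix": ["R"], "netlist_prefix": ["XR"]},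
--     "Cap": {"inst_prefix": ["C"], "netlist_prefix": ["CC"]},
--     "UNKNOWN": {"inst_prefix": [], "netlist_prefix": []},
-- }
--
-- def match_device_type(name, from_netlist=False):
--     up = name.upper()
--     best_len = 0
--     best_type = "UNKNOWN"
--     for dev_type, cfg in DEVICE_LIBRARY.items():
--         for p in (cfg["netlist_prefix"] if from_netlist else cfg["inst_prefix"]):
--             if len(p) > best_len and up.startswith(p.upper()):
--                 best_len = len(p)
--                 best_type = dev_type
--     return best_type
-- ===== Notes on version B (the rewrite author's own statement) =====
-- stated objective: simpler
-- what changed: Replaces building a candidate list and sorting it by descending prefix length with a single max-tracking pass that keeps the longest matching prefix's device type (strictly-greater update preserves first-wins ties).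
import Mathlib
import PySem

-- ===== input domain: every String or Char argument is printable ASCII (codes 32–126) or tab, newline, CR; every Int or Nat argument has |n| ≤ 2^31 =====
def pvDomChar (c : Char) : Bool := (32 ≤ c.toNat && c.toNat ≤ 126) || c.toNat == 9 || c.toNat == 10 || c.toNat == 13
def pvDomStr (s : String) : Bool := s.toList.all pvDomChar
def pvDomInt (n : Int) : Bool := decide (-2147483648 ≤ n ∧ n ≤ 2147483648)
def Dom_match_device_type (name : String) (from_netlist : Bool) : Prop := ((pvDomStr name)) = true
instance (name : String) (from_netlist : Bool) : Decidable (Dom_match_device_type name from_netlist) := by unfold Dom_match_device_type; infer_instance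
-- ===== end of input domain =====

-- B replaces A's candidate-list-plus-descending-sort with one max-tracking pass (simpler; same result).

-- ===== PORT A =====
-- DEVICE_LIBRARY restricted to the fields match_device_type reads (inst_prefix, netlist_prefix);
-- the float sizes / pin coordinates are never used by the function and are omitted.
def pvDeviceLibrary : List (String × List String × List String) :=
  [ ("NMOS", (["NM", "M"], ["XNM", "XM"]))
  , ("PMOS", (["PM"], ["XPM"]))
  , ("RES", (["R"], ["XR"]))
  , ("Cap", (["C"], ["CC"]))
  , ("UNKNOWN", ([], [])) ]

-- the 'for … in sorted(candidates, …): if …: return' loop (returns on first match)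
def pvFirstMatch (name : String) : List (Int × String × String) → String
  | [] => "UNKNOWN"
  | (_, p, dev_type) :: rest =>
      if PySem.Str.startswith (PySem.Str.upper name) (PySem.Str.upper p) then dev_type
      else pvFirstMatch name rest

def match_device_type (name : String) (from_netlist : Bool) : String :=
  let candidates : List (Int × String × String) :=
    pvDeviceLibrary.foldl (fun acc x =>
      let prefixes := if from_netlist then x.2.2 else x.2.1
      acc ++ prefixes.map (fun p => ((PySem.Str.len p : Int), p, x.1))) []
  pvFirstMatch name (PySem.List.sorted candidates (key := fun x => -x.1))

-- ===== PORT B =====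
def match_device_type_alt (name : String) (from_netlist : Bool) : String :=
  let up := PySem.Str.upper name
  let best :=
    pvDeviceLibrary.foldl (fun best x =>
      (if from_netlist then x.2.2 else x.2.1).foldl (fun best p =>
        if (PySem.Str.len p : Int) > best.1 && PySem.Str.startswith up (PySem.Str.upper p)
        then ((PySem.Str.len p : Int), x.1) else best) best)
      ((0 : Int), "UNKNOWN")
  best.2

-- ===== PRECONDITION & SPEC =====
def Spec_match_device_type (name : String) (from_netlist : Bool) (out : String) : Prop := out = match_device_type_alt name from_netlist
instance (name : String) (from_netlist : Bool) (out : String) : Decidable (Spec_match_device_type name from_netlist out) := by unfold Spec_match_device_type; infer_instance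

-- ===== CLAIM (what is proved, stated in full; the proofs are below) =====
def Claim_equal_match_device_type : Prop := ∀ (name : String) (from_netlist : Bool), Dom_match_device_type name from_netlist → Spec_match_device_type name from_netlist (match_device_type name from_netlist)

-- ===== LEMMAS AND PROOFS =====

-- ===== VERDICT (by name: the statement is the Claim_ definition above) =====
theorem match_device_type_spec : Claim_equal_match_device_type := by
  intro name from_netlist _
  unfold Spec_match_device_type match_device_type match_device_type_alt pvDeviceLibrary
  cases from_netlist
  · -- inst_prefix branch
    simp only [List.foldl, List.map, List.append_nil, List.nil_append, List.cons_append,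
      Bool.false_eq_true, ite_false]
    have hs : PySem.List.sorted
        [(PySem.Str.len "NM", ("NM", "NMOS")), (PySem.Str.len "M", ("M", "NMOS")),
          (PySem.Str.len "PM", ("PM", "PMOS")), (PySem.Str.len "R", ("R", "RES")),
          (PySem.Str.len "C", ("C", "Cap"))] (key := fun x => -x.1) =
        [(2, ("NM", "NMOS")), (2, ("PM", "PMOS")), (1, ("M", "NMOS")),
          (1, ("R", "RES")), (1, ("C", "Cap"))] := by decide
    rw [hs]
    by_cases h1 : PySem.Chars.startswith (PySem.Chars.upper name.toList) (PySem.Chars.upper ['N','M']) = true <;>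
    by_cases h2 : PySem.Chars.startswith (PySem.Chars.upper name.toList) (PySem.Chars.upper ['M']) = true <;>
    by_cases h3 : PySem.Chars.startswith (PySem.Chars.upper name.toList) (PySem.Chars.upper ['P','M']) = true <;>
    by_cases h4 : PySem.Chars.startswith (PySem.Chars.upper name.toList) (PySem.Chars.upper ['R']) = true <;>
    by_cases h5 : PySem.Chars.startswith (PySem.Chars.upper name.toList) (PySem.Chars.upper ['C']) = true <;>
    simp [pvFirstMatch, h1, h2, h3, h4, h5, PySem.Str.len]
  · -- netlist_prefix branch
    simp only [List.foldl, List.map, List.append_nil, List.nil_append, List.cons_append, ite_true]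
    have hs : PySem.List.sorted
        [(PySem.Str.len "XNM", ("XNM", "NMOS")), (PySem.Str.len "XM", ("XM", "NMOS")),
          (PySem.Str.len "XPM", ("XPM", "PMOS")), (PySem.Str.len "XR", ("XR", "RES")),
          (PySem.Str.len "CC", ("CC", "Cap"))] (key := fun x => -x.1) =
        [(3, ("XNM", "NMOS")), (3, ("XPM", "PMOS")), (2, ("XM", "NMOS")),
          (2, ("XR", "RES")), (2, ("CC", "Cap"))] := by decide
    rw [hs]
    by_cases h1 : PySem.Chars.startswith (PySem.Chars.upper name.toList) (PySem.Chars.upper ['X','N','M']) = true <;>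
    by_cases h2 : PySem.Chars.startswith (PySem.Chars.upper name.toList) (PySem.Chars.upper ['X','M']) = true <;>
    by_cases h3 : PySem.Chars.startswith (PySem.Chars.upper name.toList) (PySem.Chars.upper ['X','P','M']) = true <;>
    by_cases h4 : PySem.Chars.startswith (PySem.Chars.upper name.toList) (PySem.Chars.upper ['X','R']) = true <;>
    by_cases h5 : PySem.Chars.startswith (PySem.Chars.upper name.toList) (PySem.Chars.upper ['C','C']) = true <;>
    simp [pvFirstMatch, h1, h2, h3, h4, h5, PySem.Str.len]
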